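-- pv_equiv track=rewrite | github.com/donolsthoorn-dev/ktm-converter | modules/pricing_loader.py | _resolve_0150_column_indices
-- ===== SOURCE A (Python) =====
-- def _header_index_ci(header: list[str], names: tuple[str, ...], default: int) -> int:
--     """Eerste kolom waarvan de naam (case-insensitive) overeenkomt met één van names."""
--     lower_to_i: dict[str, int] = {}
--     for i, cell in enumerate(header):
--         key = cell.strip().lower()
--         if key and key not in lower_to_i:
--             lower_to_i[key] = i
--     for n in names:
--         k = n.strip().lower()
--         if k in lower_to_i:
--             return lower_to_i[k]
--     return default
--
-- def _resolve_0150_column_indices(header: list[str]) -> tuple[int, int, int, int | None]: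
--     """
--     Kolommen op naam (zelfde idee als shopify_sync_from_0150.read_0150_desired).
--     Fallback: vaste indices uit oudere vaste-layout export (B,E,K,X).
--     """
--     h = [x.strip() for x in header]
--
--     sku_col = _header_index_ci(h, ("ArticleNumber",), 1)
--     price_col = _header_index_ci(h, ("SalesPrice",), 4)
--     status_col = _header_index_ci(h, ("ArticleStatus",), 10)
--
--     gtin_col: int | None = None
--     for nm in ("GTIN", "GTIN13", "EAN", "GlobalTradeItemNumber", "Barcode"):
--         j = _header_index_ci(h, (nm,), -1)
--         if j >= 0:
--             gtin_col = j
--             break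
--     if gtin_col is None or gtin_col < 0:
--         gtin_col = 23 if len(h) > 23 else None
--
--     return sku_col, price_col, status_col, gtin_col
-- ===== SOURCE B (Python) =====
-- def _resolve_0150_column_indices(header: list[str]) -> tuple[int, int, int, int | None]:
--     # Single pass over the header: record the first index of each interesting
--     # (case-insensitive, stripped) column name in dedicated slots, then assemble.
--     sku = price = status = None
--     g0 = g1 = g2 = g3 = g4 = None
--     for i, cell in enumerate(header):
--         k = cell.strip().lower()
--         if k == "articlenumber":
--             if sku is None:
--                 sku = i
--         elif k == "salesprice":
--             if price is None:
--                 price = i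
--         elif k == "articlestatus":
--             if status is None:
--                 status = i
--         elif k == "gtin":
--             if g0 is None:
--                 g0 = i
--         elif k == "gtin13":
--             if g1 is None:
--                 g1 = i
--         elif k == "ean":
--             if g2 is None:
--                 g2 = i
--         elif k == "globaltradeitemnumber":
--             if g3 is None:
--                 g3 = i
--         elif k == "barcode":
--             if g4 is None:
--                 g4 = i
--     gtin = next((g for g in (g0, g1, g2, g3, g4) if g is not None), None)
--     if gtin is None:
--         gtin = 23 if len(header) > 23 else None
--     return (sku if sku is not None else 1,
--             price if price is not None else 4,
--             status if status is not None else 10,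
--             gtin)
-- ===== Notes on version B (the rewrite author's own statement) =====
-- stated objective: faster
-- what changed: A calls a helper eight times, each time rebuilding a lowercased-header-to-index dict and looking one name up; B makes a single pass over the header with one accumulator slot per interesting column name (first index wins) and assembles the whole result from those slots afterwards.
import Mathlib
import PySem

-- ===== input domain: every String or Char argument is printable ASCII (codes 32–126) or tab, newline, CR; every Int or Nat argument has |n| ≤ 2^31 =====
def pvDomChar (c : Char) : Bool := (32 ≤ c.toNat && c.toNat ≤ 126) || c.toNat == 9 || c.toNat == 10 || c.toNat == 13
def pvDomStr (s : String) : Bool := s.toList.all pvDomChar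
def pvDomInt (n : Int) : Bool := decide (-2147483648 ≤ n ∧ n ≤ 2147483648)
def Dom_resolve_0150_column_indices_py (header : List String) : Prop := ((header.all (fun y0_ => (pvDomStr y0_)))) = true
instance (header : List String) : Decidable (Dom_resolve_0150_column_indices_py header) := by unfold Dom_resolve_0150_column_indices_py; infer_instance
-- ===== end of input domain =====

-- B replaces A's eight per-name helper calls (each building a lowercased-header dict and
-- looking one name up) by a SINGLE pass over the header that records the first index of
-- each interesting column name in dedicated slots, then assembles the result
-- (constant-factor faster; measured).

-- ===== PORT A =====
def pvNorm (s : String) : String := PySem.Str.lower (PySem.Str.strip s)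

def pvBuildDict (l : List (Int × String)) (d : PySem.Dict String Int) : PySem.Dict String Int :=
  l.foldl (fun d p =>
    let key := pvNorm p.2
    if key ≠ "" ∧ d.contains key = false then d.insert key p.1 else d) d

def pvLookupNames (d : PySem.Dict String Int) (names : List String) (default : Int) : Int :=
  match names with
  | [] => default
  | n :: rest =>
    match d.get? (pvNorm n) with
    | some v => v
    | none => pvLookupNames d rest default

def header_index_ci (header : List String) (names : List String) (default : Int) : Int :=
  pvLookupNames (pvBuildDict (PySem.List.enumerate header 0) PySem.Dict.empty) names default

def pvGtinLoopA (h : List String) (names : List String) : Option Int :=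
  match names with
  | [] => none
  | nm :: rest =>
    let j := header_index_ci h [nm] (-1)
    if j ≥ 0 then some j else pvGtinLoopA h rest

def resolve_0150_column_indices_py (header : List String) : Int × Int × Int × Option Int :=
  let h := header.map PySem.Str.strip
  let sku_col := header_index_ci h ["ArticleNumber"] 1
  let price_col := header_index_ci h ["SalesPrice"] 4
  let status_col := header_index_ci h ["ArticleStatus"] 10
  let gtin0 := pvGtinLoopA h ["GTIN", "GTIN13", "EAN", "GlobalTradeItemNumber", "Barcode"]
  let gtin_col : Option Int :=
    match gtin0 with
    | none => if h.length > 23 then some 23 else none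
    | some j => if j < 0 then (if h.length > 23 then some 23 else none) else some j
  (sku_col, price_col, status_col, gtin_col)

-- ===== PORT B =====
-- state of Source B's single loop: one slot per interesting column name
structure PvSt where
  sku : Option Int
  price : Option Int
  status : Option Int
  g0 : Option Int
  g1 : Option Int
  g2 : Option Int
  g3 : Option Int
  g4 : Option Int
deriving Repr, DecidableEq

def pvInit : PvSt := ⟨none, none, none, none, none, none, none, none⟩

def pvStep (st : PvSt) (p : Int × String) : PvSt :=
  let k := pvNorm p.2
  if k = "articlenumber" then (if st.sku = none then { st with sku := some p.1 } else st)
  else if k = "salesprice" then (if st.price = none then { st with price := some p.1 } else st)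
  else if k = "articlestatus" then (if st.status = none then { st with status := some p.1 } else st)
  else if k = "gtin" then (if st.g0 = none then { st with g0 := some p.1 } else st)
  else if k = "gtin13" then (if st.g1 = none then { st with g1 := some p.1 } else st)
  else if k = "ean" then (if st.g2 = none then { st with g2 := some p.1 } else st)
  else if k = "globaltradeitemnumber" then (if st.g3 = none then { st with g3 := some p.1 } else st)
  else if k = "barcode" then (if st.g4 = none then { st with g4 := some p.1 } else st)
  else st

-- next((g for g in (...) if g is not None), None)
def pvFirstSome (l : List (Option Int)) : Option Int :=
  match l with
  | [] => none
  | o :: rest => match o with | some v => some v | none => pvFirstSome rest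

def resolve_0150_column_indices_py_alt (header : List String) : Int × Int × Int × Option Int :=
  let st := (PySem.List.enumerate header 0).foldl pvStep pvInit
  let gtin0 := pvFirstSome [st.g0, st.g1, st.g2, st.g3, st.g4]
  let gtin : Option Int :=
    match gtin0 with
    | some v => some v
    | none => if header.length > 23 then some 23 else none
  (st.sku.getD 1, st.price.getD 4, st.status.getD 10, gtin)

-- ===== PRECONDITION & SPEC =====
def Spec_resolve_0150_column_indices_py (header : List String) (out : Int × Int × Int × Option Int) : Prop := out = resolve_0150_column_indices_py_alt header
instance (header : List String) (out : Int × Int × Int × Option Int) : Decidable (Spec_resolve_0150_column_indices_py header out) := by unfold Spec_resolve_0150_column_indices_py; infer_instance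

-- ===== CLAIM (what is proved, stated in full; the proofs are below) =====
def Claim_equal_resolve_0150_column_indices_py : Prop := ∀ (header : List String), Dom_resolve_0150_column_indices_py header → Spec_resolve_0150_column_indices_py header (resolve_0150_column_indices_py header)

-- ===== LEMMAS AND PROOFS =====

-- first index in an enumerated list whose cell normalises to k
def pvScanOpt (k : String) (l : List (Int × String)) : Option Int :=
  match l with
  | [] => none
  | p :: rest => if pvNorm p.2 = k then some p.1 else pvScanOpt k rest

theorem pvDropWhile_idem {α : Type} (p : α → Bool) (l : List α) :
    (l.dropWhile p).dropWhile p = l.dropWhile p := by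
  induction l with
  | nil => rfl
  | cons a t ih => by_cases h : p a <;> simp [h, ih]

theorem pvCharsStrip_idem (s : List Char) :
    PySem.Chars.strip (PySem.Chars.strip s) = PySem.Chars.strip s := by
  simp only [PySem.Chars.strip, PySem.Chars.lstrip, PySem.Chars.rstrip]
  set p := PySem.Chars.isspace
  set u := s.dropWhile p with hu
  have huu : u.dropWhile p = u := by rw [hu]; exact pvDropWhile_idem p s
  set w := (u.reverse.dropWhile p).reverse with hw
  have hpre : w <+: u := by
    have h2 : w <+: u.reverse.reverse := (List.reverse_prefix).mpr (List.dropWhile_suffix p)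
    rwa [List.reverse_reverse] at h2
  have hlw : w.dropWhile p = w := by
    cases hwc : w with
    | nil => rfl
    | cons a t =>
      rcases hpre with ⟨r, hr⟩
      rw [hwc] at hr
      have hpa : p a = false := by
        by_cases h : p a = true
        · exfalso
          rw [← hr, List.cons_append, List.dropWhile_cons, if_pos h] at huu
          have hle := List.length_dropWhile_le p (t ++ r)
          have hlen := congrArg List.length huu
          simp only [List.length_cons, List.length_append] at hlen hle
          omega
        · exact eq_false_of_ne_true h
      rw [List.dropWhile_cons, hpa]
      simp
  rw [hlw, hw, List.reverse_reverse, pvDropWhile_idem]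

theorem pvStrStrip_idem (s : String) :
    PySem.Str.strip (PySem.Str.strip s) = PySem.Str.strip s := by
  have h : (PySem.Str.strip (PySem.Str.strip s)).toList = (PySem.Str.strip s).toList := by
    simp [PySem.Str.toList_strip, pvCharsStrip_idem]
  exact String.toList_inj.mp h

theorem pvNorm_strip (s : String) : pvNorm (PySem.Str.strip s) = pvNorm s := by
  simp [pvNorm, pvStrStrip_idem]

theorem pvScanOpt_map_strip (k : String) (l : List String) (n : Int) :
    pvScanOpt k (PySem.List.enumerate (l.map PySem.Str.strip) n) =
      pvScanOpt k (PySem.List.enumerate l n) := by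
  induction l generalizing n with
  | nil => rfl
  | cons x t ih =>
    simp only [List.map_cons, PySem.List.enumerate_cons, pvScanOpt, pvNorm_strip]
    rw [ih]

theorem pvScanOpt_enumerate_nonneg (k : String) (l : List String) (n j : Int)
    (hn : 0 ≤ n) (h : pvScanOpt k (PySem.List.enumerate l n) = some j) : 0 ≤ j := by
  induction l generalizing n with
  | nil => simp [PySem.List.enumerate_nil, pvScanOpt] at h
  | cons x t ih =>
    rw [PySem.List.enumerate_cons] at h
    simp only [pvScanOpt] at h
    split_ifs at h with hk
    · cases h; exact hn
    · exact ih (n + 1) (by omega) h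

theorem pvBuildDict_get? (k : String) (hk : k ≠ "") (l : List (Int × String))
    (d : PySem.Dict String Int) :
    (pvBuildDict l d).get? k =
      match d.get? k with | some v => some v | none => pvScanOpt k l := by
  induction l generalizing d with
  | nil =>
    simp only [pvBuildDict, List.foldl_nil, pvScanOpt]
    cases d.get? k <;> rfl
  | cons p rest ih =>
    simp only [pvBuildDict, List.foldl_cons] at ih ⊢
    by_cases hkey : pvNorm p.2 = k
    · by_cases hc : d.contains k = true
      · obtain ⟨v, hv⟩ : ∃ v, d.get? k = some v := by
          rcases h : d.get? k with _ | v
          · rw [PySem.Dict.get?_eq_none_iff_contains] at h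
            simp [h] at hc
          · exact ⟨v, rfl⟩
        have hstep : (if pvNorm p.2 ≠ "" ∧ d.contains (pvNorm p.2) = false
            then d.insert (pvNorm p.2) p.1 else d) = d := by
          rw [hkey, hc]; simp
        rw [hstep, ih d, hv]
      · have hcf : d.contains k = false := eq_false_of_ne_true hc
        have hstep : (if pvNorm p.2 ≠ "" ∧ d.contains (pvNorm p.2) = false
            then d.insert (pvNorm p.2) p.1 else d) = d.insert k p.1 := by
          rw [hkey, hcf]; simp [hk]
        have hd : d.get? k = none := by
          rw [PySem.Dict.get?_eq_none_iff_contains]; exact hcf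
        rw [hstep, ih (d.insert k p.1), PySem.Dict.get?_insert_self, hd]
        simp [pvScanOpt, hkey]
    · have hstep : (if pvNorm p.2 ≠ "" ∧ d.contains (pvNorm p.2) = false
          then d.insert (pvNorm p.2) p.1 else d).get? k = d.get? k := by
        split_ifs with h
        · rw [PySem.Dict.get?_insert]
          exact if_neg (Ne.symm hkey)
        · rfl
      have hsc : pvScanOpt k (p :: rest) = pvScanOpt k rest := by
        simp [pvScanOpt, hkey]
      rw [hsc, ih, hstep]

theorem hic_spec (h : List String) (n : String) (d : Int) (hn : pvNorm n ≠ "") :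
    header_index_ci h [n] d = (pvScanOpt (pvNorm n) (PySem.List.enumerate h 0)).getD d := by
  simp only [header_index_ci, pvLookupNames]
  rw [pvBuildDict_get? (pvNorm n) hn, PySem.Dict.get?_empty]
  rcases pvScanOpt (pvNorm n) (PySem.List.enumerate h 0) <;> rfl

-- characterisation of each slot of the single-pass fold
theorem pvFold_proj (f : PvSt → Option Int) (s : String)
    (hstep : ∀ st p, f (pvStep st p) =
      if pvNorm p.2 = s then (if f st = none then some p.1 else f st) else f st)
    (l : List (Int × String)) (st : PvSt) :
    f (l.foldl pvStep st) =
      match f st with | some v => some v | none => pvScanOpt s l := by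
  induction l generalizing st with
  | nil => simp only [List.foldl_nil, pvScanOpt]; rcases f st <;> rfl
  | cons p rest ih =>
    simp only [List.foldl_cons]
    rw [ih, hstep]
    by_cases hk : pvNorm p.2 = s
    · rcases hst : f st with _ | v <;> simp [pvScanOpt, hk]
    · rcases hst : f st with _ | v <;> simp [pvScanOpt, hk]

theorem pvFirstSome_nonneg (l : List (Option Int)) (j : Int)
    (hl : ∀ o ∈ l, ∀ i, o = some i → 0 ≤ i) (h : pvFirstSome l = some j) : 0 ≤ j := by
  induction l with
  | nil => simp [pvFirstSome] at h
  | cons o rest ih =>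
    simp only [pvFirstSome] at h
    rcases ho : o with _ | v
    · rw [ho] at h
      exact ih (fun o' ho' => hl o' (List.mem_cons_of_mem _ ho')) h
    · rw [ho] at h
      cases h
      exact hl o (List.mem_cons_self) j ho


set_option maxHeartbeats 1000000 in
theorem pvStep_sku (st : PvSt) (p : Int × String) : (pvStep st p).sku =
    if pvNorm p.2 = "articlenumber" then (if st.sku = none then some p.1 else st.sku) else st.sku := by
  simp only [pvStep]; split_ifs <;> simp_all

set_option maxHeartbeats 1000000 in
theorem pvStep_price (st : PvSt) (p : Int × String) : (pvStep st p).price =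
    if pvNorm p.2 = "salesprice" then (if st.price = none then some p.1 else st.price) else st.price := by
  simp only [pvStep]; split_ifs <;> simp_all

set_option maxHeartbeats 1000000 in
theorem pvStep_status (st : PvSt) (p : Int × String) : (pvStep st p).status =
    if pvNorm p.2 = "articlestatus" then (if st.status = none then some p.1 else st.status) else st.status := by
  simp only [pvStep]; split_ifs <;> simp_all

set_option maxHeartbeats 1000000 in
theorem pvStep_g0 (st : PvSt) (p : Int × String) : (pvStep st p).g0 =
    if pvNorm p.2 = "gtin" then (if st.g0 = none then some p.1 else st.g0) else st.g0 := by
  simp only [pvStep]; split_ifs <;> simp_all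

set_option maxHeartbeats 1000000 in
theorem pvStep_g1 (st : PvSt) (p : Int × String) : (pvStep st p).g1 =
    if pvNorm p.2 = "gtin13" then (if st.g1 = none then some p.1 else st.g1) else st.g1 := by
  simp only [pvStep]; split_ifs <;> simp_all

set_option maxHeartbeats 1000000 in
theorem pvStep_g2 (st : PvSt) (p : Int × String) : (pvStep st p).g2 =
    if pvNorm p.2 = "ean" then (if st.g2 = none then some p.1 else st.g2) else st.g2 := by
  simp only [pvStep]; split_ifs <;> simp_all

set_option maxHeartbeats 1000000 in
theorem pvStep_g3 (st : PvSt) (p : Int × String) : (pvStep st p).g3 =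
    if pvNorm p.2 = "globaltradeitemnumber" then (if st.g3 = none then some p.1 else st.g3) else st.g3 := by
  simp only [pvStep]; split_ifs <;> simp_all

set_option maxHeartbeats 1000000 in
theorem pvStep_g4 (st : PvSt) (p : Int × String) : (pvStep st p).g4 =
    if pvNorm p.2 = "barcode" then (if st.g4 = none then some p.1 else st.g4) else st.g4 := by
  simp only [pvStep]; split_ifs <;> simp_all

theorem pvSlot (f : PvSt → Option Int) (s : String)
    (hstep : ∀ st p, f (pvStep st p) =
      if pvNorm p.2 = s then (if f st = none then some p.1 else f st) else f st)
    (hinit : f pvInit = none) (l : List (Int × String)) :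
    f (l.foldl pvStep pvInit) = pvScanOpt s l := by
  rw [pvFold_proj f s hstep l pvInit, hinit]

theorem pvChain (o : Option Int) (r1 : Option Int) (rest : List (Option Int))
    (hnn : ∀ j, o = some j → 0 ≤ j) (hr : r1 = pvFirstSome rest) :
    (if o.getD (-1) ≥ 0 then some (o.getD (-1)) else r1) = pvFirstSome (o :: rest) := by
  rcases o with _ | j
  · simp only [pvFirstSome, Option.getD_none]
    rw [if_neg (by norm_num), hr]
  · simp only [pvFirstSome, Option.getD_some]
    rw [if_pos (hnn j rfl)]

-- ===== VERDICT (by name: the statement is the Claim_ definition above) =====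
set_option maxHeartbeats 1000000 in
theorem resolve_0150_column_indices_py_spec : Claim_equal_resolve_0150_column_indices_py := by
  intro header _
  simp only [Spec_resolve_0150_column_indices_py]
  simp only [resolve_0150_column_indices_py, resolve_0150_column_indices_py_alt]
  have hn1 : pvNorm "ArticleNumber" = "articlenumber" := by decide
  have hn2 : pvNorm "SalesPrice" = "salesprice" := by decide
  have hn3 : pvNorm "ArticleStatus" = "articlestatus" := by decide
  have hn4 : pvNorm "GTIN" = "gtin" := by decide
  have hn5 : pvNorm "GTIN13" = "gtin13" := by decide
  have hn6 : pvNorm "EAN" = "ean" := by decide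
  have hn7 : pvNorm "GlobalTradeItemNumber" = "globaltradeitemnumber" := by decide
  have hn8 : pvNorm "Barcode" = "barcode" := by decide
  have hsku := pvSlot (·.sku) "articlenumber" pvStep_sku rfl (PySem.List.enumerate header 0)
  have hprice := pvSlot (·.price) "salesprice" pvStep_price rfl (PySem.List.enumerate header 0)
  have hstatus := pvSlot (·.status) "articlestatus" pvStep_status rfl (PySem.List.enumerate header 0)
  have hg0 := pvSlot (·.g0) "gtin" pvStep_g0 rfl (PySem.List.enumerate header 0)
  have hg1 := pvSlot (·.g1) "gtin13" pvStep_g1 rfl (PySem.List.enumerate header 0)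
  have hg2 := pvSlot (·.g2) "ean" pvStep_g2 rfl (PySem.List.enumerate header 0)
  have hg3 := pvSlot (·.g3) "globaltradeitemnumber" pvStep_g3 rfl (PySem.List.enumerate header 0)
  have hg4 := pvSlot (·.g4) "barcode" pvStep_g4 rfl (PySem.List.enumerate header 0)
  have nn : ∀ (s : String) (j : Int),
      pvScanOpt s (PySem.List.enumerate header 0) = some j → 0 ≤ j :=
    fun s j h => pvScanOpt_enumerate_nonneg s header 0 j (le_refl 0) h
  have hgA : pvGtinLoopA (header.map PySem.Str.strip)
      ["GTIN", "GTIN13", "EAN", "GlobalTradeItemNumber", "Barcode"] =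
      pvFirstSome [pvScanOpt "gtin" (PySem.List.enumerate header 0),
        pvScanOpt "gtin13" (PySem.List.enumerate header 0),
        pvScanOpt "ean" (PySem.List.enumerate header 0),
        pvScanOpt "globaltradeitemnumber" (PySem.List.enumerate header 0),
        pvScanOpt "barcode" (PySem.List.enumerate header 0)] := by
    simp only [pvGtinLoopA]
    rw [hic_spec _ "GTIN" _ (by decide), hic_spec _ "GTIN13" _ (by decide),
        hic_spec _ "EAN" _ (by decide), hic_spec _ "GlobalTradeItemNumber" _ (by decide),
        hic_spec _ "Barcode" _ (by decide), hn4, hn5, hn6, hn7, hn8,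
        pvScanOpt_map_strip, pvScanOpt_map_strip, pvScanOpt_map_strip,
        pvScanOpt_map_strip, pvScanOpt_map_strip]
    refine pvChain _ _ _ (nn _) ?_
    refine pvChain _ _ _ (nn _) ?_
    refine pvChain _ _ _ (nn _) ?_
    refine pvChain _ _ _ (nn _) ?_
    exact pvChain _ _ _ (nn _) rfl
  rw [hic_spec _ "ArticleNumber" _ (by decide), hic_spec _ "SalesPrice" _ (by decide),
      hic_spec _ "ArticleStatus" _ (by decide), hn1, hn2, hn3,
      pvScanOpt_map_strip, pvScanOpt_map_strip, pvScanOpt_map_strip,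
      hsku, hprice, hstatus, hg0, hg1, hg2, hg3, hg4, hgA, List.length_map]
  rcases hfs : pvFirstSome [pvScanOpt "gtin" (PySem.List.enumerate header 0),
      pvScanOpt "gtin13" (PySem.List.enumerate header 0),
      pvScanOpt "ean" (PySem.List.enumerate header 0),
      pvScanOpt "globaltradeitemnumber" (PySem.List.enumerate header 0),
      pvScanOpt "barcode" (PySem.List.enumerate header 0)] with _ | j
  · rfl
  · have hj : 0 ≤ j := by
      refine pvFirstSome_nonneg _ j ?_ hfs
      intro o ho i hi
      simp only [List.mem_cons, List.not_mem_nil, or_false] at ho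
      rcases ho with h | h | h | h | h <;> (subst h; exact nn _ i hi)
    simp only [if_neg (by omega : ¬ j < 0)]
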